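-- pv_equiv track=rewrite | github.com/Zabari/HunterExample | p23.py | propFactSum
-- ===== SOURCE A (Python) =====
-- import itertools as it
-- from operator import mul
-- import functools as func
--
-- def propFactSum(L):
--     tmpL=[]
--     tmpSet=set()
--     num=0
--     ret=0
--     for num in range(len(L)-1):
--         for combo in it.combinations(L,num+1):
--             tmpSet.add(combo)
--     tmpL=list(tmpSet)
--     for i in range(len(tmpL)):
--          tmpL[i]=list(tmpL[i])
--          tmpL[i]=func.reduce(mul,tmpL[i] , 1)
--          ret+=tmpL[i]
--
--     return ret+1
-- ===== SOURCE B (Python) =====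
-- def propFactSum(L):
--     # O(n) distinct-subsequence DP: total = sum of products over all distinct
--     # subsequences (incl. the empty one); subtract the full product (the only
--     # length-len(L) subsequence) to keep only proper ones, as A does.
--     if not L:
--         return 1
--     total = 1          # sum of products of distinct subsequences seen so far
--     last = {}          # value -> total just before its previous occurrence
--     full = 1           # product of all elements
--     for x in L:
--         prev = total
--         total = total * (1 + x) - x * last.get(x, 0)
--         last[x] = prev
--         full *= x
--     return total - full
-- ===== Notes on version B (the rewrite author's own statement) =====
-- stated objective: faster
-- what changed: Replaces the exponential enumeration of all distinct proper combinations (set of 2^n tuples, then a product per tuple) by the classic linear distinct-subsequence DP (running sum of products with a last-occurrence correction dictionary), subtracting the full product at the end.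
import Mathlib
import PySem

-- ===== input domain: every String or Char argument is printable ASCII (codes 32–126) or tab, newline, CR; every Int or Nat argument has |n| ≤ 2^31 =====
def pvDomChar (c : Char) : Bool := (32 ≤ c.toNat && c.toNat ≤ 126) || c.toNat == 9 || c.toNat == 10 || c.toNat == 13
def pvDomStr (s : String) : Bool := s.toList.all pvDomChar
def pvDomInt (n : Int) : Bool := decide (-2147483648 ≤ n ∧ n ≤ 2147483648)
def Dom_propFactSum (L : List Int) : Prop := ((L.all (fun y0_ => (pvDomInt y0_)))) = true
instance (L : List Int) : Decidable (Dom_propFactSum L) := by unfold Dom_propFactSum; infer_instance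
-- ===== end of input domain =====

-- B replaces A's exponential combination enumeration by the linear distinct-subsequence DP (objective: faster).

-- ===== PORT A =====
-- itertools.combinations(L, k) as value tuples, in itertools order (hand port, exact)
def pvCombos : List Int → Nat → List (List Int)
  | _, 0 => [[]]
  | [], _ + 1 => []
  | x :: xs, k + 1 => (pvCombos xs k).map (fun c => x :: c) ++ pvCombos xs (k + 1)

def propFactSum (L : List Int) : Int :=
  -- for num in range(len(L)-1): for combo in combinations(L, num+1): tmpSet.add(combo)
  let tmpSet : PySem.Set (List Int) :=
    (PySem.List.pyRange 0 ((L.length : Int) - 1) 1).foldl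
      (fun st num => (pvCombos L (num + 1).toNat).foldl PySem.Set.add st)
      PySem.Set.empty
  -- the final loop sums reduce(mul, combo, 1) over the set's elements; the sum does not
  -- depend on the set's iteration order, so folding over the Set's list is exact
  let ret : Int := tmpSet.foldl (fun r t => r + t.foldl (· * ·) 1) 0
  ret + 1

-- ===== PORT B =====
def propFactSum_alt (L : List Int) : Int :=
  if L = [] then 1
  else
    let st := L.foldl
      (fun (st : Int × PySem.Dict Int Int × Int) x =>
        (st.1 * (1 + x) - x * st.2.1.getD x 0, st.2.1.insert x st.1, st.2.2 * x))
      (1, PySem.Dict.empty, 1)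
    st.1 - st.2.2

-- ===== PRECONDITION & SPEC =====
def Spec_propFactSum (L : List Int) (out : Int) : Prop := out = propFactSum_alt L
instance (L : List Int) (out : Int) : Decidable (Spec_propFactSum L out) := by unfold Spec_propFactSum; infer_instance

-- ===== CLAIM (what is proved, stated in full; the proofs are below) =====
def Claim_equal_propFactSum : Prop := ∀ (L : List Int), Dom_propFactSum L → Spec_propFactSum L (propFactSum L)

-- ===== LEMMAS AND PROOFS =====

-- the set of distinct sublists of L, and the sum of their products
def pvF (L : List Int) : Finset (List Int) := L.sublists.toFinset
def pvS (L : List Int) : Int := ∑ t ∈ pvF L, t.prod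

lemma pvMem_F {t L : List Int} : t ∈ pvF L ↔ t.Sublist L := by
  simp [pvF, List.mem_sublists]

lemma pvF_concat (P : List Int) (y : Int) :
    pvF (P ++ [y]) = pvF P ∪ (pvF P).image (· ++ [y]) := by
  ext t
  simp [pvF, List.sublists_concat, List.mem_sublists, eq_comm]

lemma pvEnds_of_mem_image {P t : List Int} {y : Int}
    (h : t ∈ (pvF P).image (· ++ [y])) : t.getLast? = some y := by
  rcases Finset.mem_image.mp h with ⟨s, _, rfl⟩
  simp

lemma pvMem_image_of_ends {P t : List Int} {y : Int}
    (ht : t ∈ pvF P) (hlast : t.getLast? = some y) :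
    t ∈ (pvF P).image (· ++ [y]) := by
  have hne : t ≠ [] := by rintro rfl; simp at hlast
  have hdrop : t.dropLast ∈ pvF P :=
    pvMem_F.mpr ((List.dropLast_sublist t).trans (pvMem_F.mp ht))
  have hy : t.getLast hne = y := by
    rw [List.getLast?_eq_some_getLast hne] at hlast
    exact Option.some_inj.mp hlast
  refine Finset.mem_image.mpr ⟨t.dropLast, hdrop, ?_⟩
  conv_rhs => rw [← List.dropLast_append_getLast hne]
  rw [hy]

lemma pvInter_eq (P : List Int) (y : Int) :
    pvF P ∩ (pvF P).image (· ++ [y]) =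
      (pvF P).filter (fun t => t.getLast? = some y) := by
  ext t
  simp only [Finset.mem_inter, Finset.mem_filter]
  exact ⟨fun ⟨h1, h2⟩ => ⟨h1, pvEnds_of_mem_image h2⟩,
         fun ⟨h1, h2⟩ => ⟨h1, pvMem_image_of_ends h1 h2⟩⟩

lemma pvSum_image (P : List Int) (y : Int) :
    ∑ t ∈ (pvF P).image (· ++ [y]), t.prod = y * pvS P := by
  rw [Finset.sum_image (by intro a _ b _ h; exact List.append_cancel_right h)]
  simp only [List.prod_append, List.prod_cons, List.prod_nil, mul_one]
  rw [← Finset.sum_mul, mul_comm]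
  rfl

lemma pvS_concat (P : List Int) (y : Int) :
    pvS (P ++ [y]) =
      pvS P + y * pvS P - ∑ t ∈ (pvF P).filter (fun t => t.getLast? = some y), t.prod := by
  have h := Finset.sum_union_inter (s₁ := pvF P) (s₂ := (pvF P).image (· ++ [y]))
    (f := fun t => List.prod t)
  rw [pvInter_eq] at h
  have h2 : pvS (P ++ [y]) = ∑ t ∈ pvF P ∪ (pvF P).image (· ++ [y]), t.prod := by
    rw [pvS, pvF_concat]
  rw [h2, ← pvSum_image P y]
  simp only [pvS]
  omega

lemma pvFilter_concat_self (P : List Int) (y : Int) :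
    (pvF (P ++ [y])).filter (fun t => t.getLast? = some y) =
      (pvF P).image (· ++ [y]) := by
  rw [pvF_concat, Finset.filter_union]
  have h1 : (pvF P).filter (fun t => t.getLast? = some y) ⊆ (pvF P).image (· ++ [y]) := by
    intro t ht
    rcases Finset.mem_filter.mp ht with ⟨h1, h2⟩
    exact pvMem_image_of_ends h1 (by simpa using h2)
  have h2 : ((pvF P).image (· ++ [y])).filter (fun t => t.getLast? = some y) =
      (pvF P).image (· ++ [y]) := by
    apply Finset.filter_true_of_mem
    intro t ht
    exact pvEnds_of_mem_image ht
  rw [h2]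
  exact Finset.union_eq_right.mpr h1

lemma pvFilter_concat_ne (P : List Int) {x y : Int} (hxy : x ≠ y) :
    (pvF (P ++ [y])).filter (fun t => t.getLast? = some x) =
      (pvF P).filter (fun t => t.getLast? = some x) := by
  rw [pvF_concat, Finset.filter_union]
  have h2 : ((pvF P).image (· ++ [y])).filter (fun t => t.getLast? = some x) = ∅ := by
    apply Finset.filter_false_of_mem
    intro t ht
    have := pvEnds_of_mem_image ht
    simp [this, hxy.symm]
  rw [h2, Finset.union_empty]

-- the DP step and its invariant
def pvStep (st : Int × PySem.Dict Int Int × Int) (x : Int) : Int × PySem.Dict Int Int × Int :=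
  (st.1 * (1 + x) - x * st.2.1.getD x 0, st.2.1.insert x st.1, st.2.2 * x)

def pvInv (P : List Int) (st : Int × PySem.Dict Int Int × Int) : Prop :=
  st.1 = pvS P ∧
  (∀ x : Int, x * st.2.1.getD x 0 =
      ∑ t ∈ (pvF P).filter (fun t => t.getLast? = some x), t.prod) ∧
  st.2.2 = P.prod

lemma pvInv_nil : pvInv [] (1, PySem.Dict.empty, 1) := by
  refine ⟨by simp [pvS, pvF, List.sublists], ?_, by simp⟩
  intro x
  have : (pvF []).filter (fun t => t.getLast? = some x) = ∅ := by
    apply Finset.filter_false_of_mem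
    intro t ht
    have := pvMem_F.mp ht
    rw [List.sublist_nil.mp this]
    simp
  simp [this, PySem.Dict.getD_empty]

lemma pvInv_step {P : List Int} {st : Int × PySem.Dict Int Int × Int} (h : pvInv P st)
    (y : Int) : pvInv (P ++ [y]) (pvStep st y) := by
  obtain ⟨hT, hD, hF⟩ := h
  refine ⟨?_, ?_, by simp [pvStep, hF]⟩
  · show st.1 * (1 + y) - y * st.2.1.getD y 0 = pvS (P ++ [y])
    rw [pvS_concat, ← hD y, hT]
    ring
  · intro x
    show x * (st.2.1.insert y st.1).getD x 0 = _
    by_cases hxy : x = y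
    · subst hxy
      rw [PySem.Dict.getD_insert_self, pvFilter_concat_self, pvSum_image, hT]
    · rw [PySem.Dict.getD_insert, if_neg hxy, pvFilter_concat_ne P hxy, hD x]

lemma pvInv_foldl (R : List Int) : ∀ (P : List Int) (st : Int × PySem.Dict Int Int × Int),
    pvInv P st → pvInv (P ++ R) (R.foldl pvStep st) := by
  induction R with
  | nil => intro P st h; simpa using h
  | cons y R ih =>
    intro P st h
    have := ih (P ++ [y]) (pvStep st y) (pvInv_step h y)
    simpa using this

lemma pvAlt_eq (L : List Int) (hL : L ≠ []) : propFactSum_alt L = pvS L - L.prod := by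
  have h := pvInv_foldl L [] (1, PySem.Dict.empty, 1) pvInv_nil
  simp only [List.nil_append] at h
  rw [propFactSum_alt, if_neg hL]
  show (L.foldl pvStep (1, PySem.Dict.empty, 1)).1
      - (L.foldl pvStep (1, PySem.Dict.empty, 1)).2.2 = pvS L - L.prod
  rw [h.1, h.2.2]

-- === A side ===

lemma pvMem_combos {t L : List Int} : ∀ {k : Nat},
    t ∈ pvCombos L k ↔ t.Sublist L ∧ t.length = k := by
  induction L generalizing t with
  | nil =>
    intro k
    cases k with
    | zero => simp [pvCombos, List.sublist_nil, List.length_eq_zero_iff]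
    | succ k =>
      simp only [pvCombos, List.not_mem_nil, false_iff, not_and]
      intro hs
      rw [List.sublist_nil.mp hs]
      simp
  | cons x xs ih =>
    intro k
    cases k with
    | zero =>
      simp only [pvCombos, List.mem_singleton]
      constructor
      · rintro rfl; simp
      · rintro ⟨_, h⟩; exact List.length_eq_zero_iff.mp h
    | succ k =>
      simp only [pvCombos, List.mem_append, List.mem_map]
      constructor
      · rintro (⟨c, hc, rfl⟩ | h)
        · obtain ⟨hs, hl⟩ := ih.mp hc
          exact ⟨List.cons_sublist_cons.mpr hs, by simp [hl]⟩
        · obtain ⟨hs, hl⟩ := ih.mp h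
          exact ⟨hs.trans (List.sublist_cons_self x xs), hl⟩
      · rintro ⟨hs, hl⟩
        cases t with
        | nil => simp at hl
        | cons a t' =>
          cases hs with
          | cons _ h' => exact Or.inr (ih.mpr ⟨h', by simpa using hl⟩)
          | cons₂ _ h' => exact Or.inl ⟨t', ih.mpr ⟨h', by simpa using hl⟩, rfl⟩

def pvASet (L : List Int) : PySem.Set (List Int) :=
  (PySem.List.pyRange 0 ((L.length : Int) - 1) 1).foldl
    (fun st num => (pvCombos L (num + 1).toNat).foldl PySem.Set.add st)
    PySem.Set.empty

lemma pvMem_foldl_update {α β : Type} [BEq α] [LawfulBEq α] (g : β → List α)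
    (l : List β) (s : PySem.Set α) (t : α) :
    t ∈ l.foldl (fun st num => (g num).foldl PySem.Set.add st) s ↔
      t ∈ s ∨ ∃ num ∈ l, t ∈ g num := by
  induction l generalizing s with
  | nil => simp
  | cons b l ih =>
    simp only [List.foldl_cons, ih, List.mem_cons]
    have : t ∈ (g b).foldl PySem.Set.add s ↔ t ∈ s ∨ t ∈ g b := by
      have := PySem.Set.mem_foldl_add (l := g b) (f := id) (s := s) (y := t)
      simpa [eq_comm] using this
    rw [this]
    constructor
    · rintro ((h | h) | ⟨n, hn, ht⟩)
      · exact Or.inl h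
      · exact Or.inr ⟨b, Or.inl rfl, h⟩
      · exact Or.inr ⟨n, Or.inr hn, ht⟩
    · rintro (h | ⟨n, (rfl | hn), ht⟩)
      · exact Or.inl (Or.inl h)
      · exact Or.inl (Or.inr ht)
      · exact Or.inr ⟨n, hn, ht⟩

lemma pvNodup_foldl_update {α β : Type} [BEq α] [LawfulBEq α] (g : β → List α)
    (l : List β) (s : PySem.Set α) (hs : s.Nodup) :
    (l.foldl (fun st num => (g num).foldl PySem.Set.add st) s).Nodup := by
  induction l generalizing s with
  | nil => simpa
  | cons b l ih =>
    apply ih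
    have : ∀ (m : List α) (s' : PySem.Set α), s'.Nodup → (m.foldl PySem.Set.add s').Nodup := by
      intro m
      induction m with
      | nil => intro s' h; simpa
      | cons a m ihm => intro s' h; exact ihm _ (PySem.Set.nodup_add _ _ h)
    exact this (g b) s hs

lemma pvMem_ASet {L t : List Int} :
    t ∈ pvASet L ↔ t.Sublist L ∧ t ≠ [] ∧ t ≠ L := by
  rw [pvASet, pvMem_foldl_update]
  simp only [PySem.Set.empty, List.not_mem_nil, false_or]
  constructor
  · rintro ⟨num, hnum, ht⟩
    rw [PySem.List.mem_pyRange_one] at hnum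
    obtain ⟨h0, h1⟩ := hnum
    obtain ⟨hs, hl⟩ := pvMem_combos.mp ht
    refine ⟨hs, ?_, ?_⟩
    · intro h; rw [h] at hl; simp at hl; omega
    · intro h; rw [h] at hl; omega
  · rintro ⟨hs, hne, hneL⟩
    refine ⟨(t.length : Int) - 1, ?_, ?_⟩
    · rw [PySem.List.mem_pyRange_one]
      have hlen : t.length ≤ L.length := hs.length_le
      have hlt : t.length < L.length := by
        rcases lt_or_eq_of_le hlen with h | h
        · exact h
        · exact absurd (hs.eq_of_length h) hneL
      have hpos : 0 < t.length := List.length_pos_iff.mpr hne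
      constructor <;> [omega; omega]
    · apply pvMem_combos.mpr
      refine ⟨hs, ?_⟩
      have hpos : 0 < t.length := List.length_pos_iff.mpr hne
      omega

lemma pvNodup_ASet (L : List Int) : (pvASet L).Nodup := by
  apply pvNodup_foldl_update
  exact List.nodup_nil

lemma pvFoldl_sum (l : List (List Int)) (r : Int) :
    l.foldl (fun r t => r + t.foldl (· * ·) 1) r = r + (l.map List.prod).sum := by
  induction l generalizing r with
  | nil => simp
  | cons t l ih =>
    simp only [List.foldl_cons, ih, List.map_cons, List.sum_cons]
    rw [← List.prod_eq_foldl]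
    ring

lemma pvS_split (L : List Int) (hL : L ≠ []) :
    pvS L = (∑ t ∈ (pvF L).filter (fun t => t ≠ [] ∧ t ≠ L), t.prod) + 1 + L.prod := by
  have hsplit := Finset.sum_filter_add_sum_filter_not (pvF L)
    (fun t => t ≠ [] ∧ t ≠ L) (fun t => t.prod)
  have hnot : (pvF L).filter (fun t => ¬(t ≠ [] ∧ t ≠ L)) = {[], L} := by
    ext t
    simp only [Finset.mem_filter, Finset.mem_insert, Finset.mem_singleton, not_and_or,
      not_not]
    constructor
    · rintro ⟨_, h | h⟩ <;> [exact Or.inl h; exact Or.inr h]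
    · rintro (rfl | rfl)
      · exact ⟨pvMem_F.mpr (List.nil_sublist _), Or.inl rfl⟩
      · exact ⟨pvMem_F.mpr (List.Sublist.refl _), Or.inr rfl⟩
  rw [hnot] at hsplit
  have hpair : ∑ t ∈ ({[], L} : Finset (List Int)), t.prod = 1 + L.prod := by
    simp [Finset.sum_pair (Ne.symm hL)]
  rw [hpair] at hsplit
  rw [pvS, ← hsplit]
  ring

lemma pvA_eq (L : List Int) (hL : L ≠ []) : propFactSum L = pvS L - L.prod := by
  have hset : propFactSum L = ((pvASet L).map List.prod).sum + 1 := by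
    rw [propFactSum]
    show ((pvASet L).foldl (fun r t => r + t.foldl (· * ·) 1) 0) + 1 = _
    rw [pvFoldl_sum]
    ring_nf
  have htofin : ((pvASet L).map List.prod).sum =
      ∑ t ∈ (pvASet L).toFinset, t.prod := by
    rw [List.sum_toFinset _ (pvNodup_ASet L)]
  have hfin : (pvASet L).toFinset = (pvF L).filter (fun t => t ≠ [] ∧ t ≠ L) := by
    ext t
    simp only [List.mem_toFinset, Finset.mem_filter, pvMem_ASet, pvMem_F]
  rw [hset, htofin, hfin, pvS_split L hL]
  ring

-- ===== VERDICT (by name: the statement is the Claim_ definition above) =====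
theorem propFactSum_spec : Claim_equal_propFactSum := by
  intro L _
  show propFactSum L = propFactSum_alt L
  by_cases hL : L = []
  · subst hL; decide
  · rw [pvA_eq L hL, pvAlt_eq L hL]
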